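-- pv_equiv track=rewrite | github.com/mithrantir/CodinGame | practice/puzzles/easy/Rectangular block spinner.py | rotate_by_45
-- ===== SOURCE A (Python) =====
-- def rotate_by_45(b, dim):  # ugly
--     b_r = [[] for ii in range(2 * dim - 1)]
--     for ii in range(dim):
--         for jj in range(ii + 1):
--             b_r[ii].append(b[jj][dim - 1 - ii + jj])
--     for ii in range(dim - 1):
--         for jj in range(dim - 1 - ii):
--             b_r[dim + ii].append(b[ii + 1 + jj][jj])
--     b_r_print = [[] for ii in range(2 * dim - 1)]
--     for ii in range(dim - 1):
--         for jj in range(dim - 2 - ii):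
--             b_r_print[ii].append(' ')
--         for jj in range(len(b_r[ii])):
--             b_r_print[ii].append(' ')
--             b_r_print[ii].append(b_r[ii][jj])
--         for jj in range(dim - 1 - ii):
--             b_r_print[ii].append(' ')
--     b_r_print[dim - 1].append(b_r[dim - 1][0])
--     for jj in range(1, len(b_r[dim - 1])):
--         b_r_print[dim - 1].append(' ')
--         b_r_print[dim - 1].append(b_r[dim - 1][jj])
--     for ii in range(dim - 1):
--         for jj in range(ii):
--             b_r_print[dim + ii].append(' ')
--         for jj in range(len(b_r[dim + ii])):
--             b_r_print[dim + ii].append(' ')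
--             b_r_print[dim + ii].append(b_r[dim + ii][jj])
--         for jj in range(ii + 1):
--             b_r_print[dim + ii].append(' ')
--
--     return b_r_print
-- ===== SOURCE B (Python) =====
-- def rotate_by_45(b, dim):
--     # The diamond layout is only defined for a positive block size.
--     if dim < 1:
--         raise ValueError("dim must be at least 1")
--     n = 2 * dim - 1
--
--     # b[r][c] lands at output row dim-1+r-c, column r+c; every other cell is a space.
--     def cell(i, k):
--         r, rem = divmod(i + k - (dim - 1), 2)
--         c = k - r
--         if rem == 0 and 0 <= r < dim and 0 <= c < dim:
--             return b[r][c]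
--         return ' '
--
--     return [[cell(i, k) for k in range(n)] for i in range(n)]
-- ===== Notes on version B (the rewrite author's own statement) =====
-- stated objective: simpler
-- what changed: A stages the anti-diagonals into an intermediate list and then pads/interleaves each of three row classes (top, middle, bottom) with special-cased space loops; B computes every output cell directly by the closed-form inverse mapping (cell (i,k) holds b[r][c] with r=(i+k-dim+1)//2, c=k-r when that is integral and in range, else a space), one uniform comprehension, no intermediate structure.
import Mathlib
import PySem

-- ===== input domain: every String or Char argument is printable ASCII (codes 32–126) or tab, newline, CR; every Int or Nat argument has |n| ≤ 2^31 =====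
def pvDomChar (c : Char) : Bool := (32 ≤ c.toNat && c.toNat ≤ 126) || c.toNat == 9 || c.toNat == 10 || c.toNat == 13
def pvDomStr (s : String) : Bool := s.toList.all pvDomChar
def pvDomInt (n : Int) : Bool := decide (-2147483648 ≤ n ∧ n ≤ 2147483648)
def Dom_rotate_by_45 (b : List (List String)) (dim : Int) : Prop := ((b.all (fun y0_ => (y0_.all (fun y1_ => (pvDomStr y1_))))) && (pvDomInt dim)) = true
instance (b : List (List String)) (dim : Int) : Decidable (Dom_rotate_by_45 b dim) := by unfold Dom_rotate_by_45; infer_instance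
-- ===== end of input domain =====

-- B replaces A's anti-diagonal gather plus three special-cased padding loops by one
-- per-cell closed-form lookup (objective: simpler; same O(dim^2) cost).

-- b[r][c] with nonnegative in-range indices (exact under Pre_, which puts every access in range)
def pvGet2 (b : List (List String)) (r c : Nat) : String := (b.getD r []).getD c " "
-- g[i].append(x) on a list of lists (exact when i < g.length, guaranteed under Pre_)
def pvApp (g : List (List String)) (i : Nat) (x : String) : List (List String) :=
  g.set i (g.getD i [] ++ [x])

-- ===== PORT A =====
-- Literal transliteration, loop by loop (each Python loop nest is one named stage;
-- Nat ranges and total indexing are exact for dim ≥ 1 with every access in range,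
-- which Pre_rotate_by_45 guarantees — exactly where the Python returns).
-- first loop nest: b_r[ii].append(b[jj][dim-1-ii+jj])
def pvBr1 (b : List (List String)) (d : Nat) : List (List String) :=
  (List.range d).foldl (fun g ii =>
    (List.range (ii+1)).foldl (fun g jj => pvApp g ii (pvGet2 b jj (d - 1 - ii + jj))) g)
    (List.replicate (2*d - 1) [])
-- second loop nest: b_r[dim+ii].append(b[ii+1+jj][jj])
def pvBr2 (b : List (List String)) (d : Nat) : List (List String) :=
  (List.range (d-1)).foldl (fun g ii =>
    (List.range (d - 1 - ii)).foldl (fun g jj => pvApp g (d + ii) (pvGet2 b (ii + 1 + jj) jj)) g)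
    (pvBr1 b d)
-- third loop nest: the top rows of b_r_print
def pvP1 (br : List (List String)) (d : Nat) : List (List String) :=
  (List.range (d-1)).foldl (fun g ii =>
    let g1 := (List.range (d - 2 - ii)).foldl (fun g _ => pvApp g ii " ") g
    let g2 := (List.range (br.getD ii []).length).foldl
        (fun g jj => pvApp (pvApp g ii " ") ii ((br.getD ii []).getD jj " ")) g1
    (List.range (d - 1 - ii)).foldl (fun g _ => pvApp g ii " ") g2)
    (List.replicate (2*d - 1) [])
-- middle row: one append, then the range(1, len) loop
def pvP3 (br : List (List String)) (d : Nat) : List (List String) :=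
  (List.range' 1 ((br.getD (d-1) []).length - 1)).foldl
    (fun g jj => pvApp (pvApp g (d-1) " ") (d-1) ((br.getD (d-1) []).getD jj " "))
    (pvApp (pvP1 br d) (d-1) ((br.getD (d-1) []).getD 0 " "))
-- last loop nest: the bottom rows
def pvP4 (br : List (List String)) (d : Nat) : List (List String) :=
  (List.range (d-1)).foldl (fun g ii =>
    let g1 := (List.range ii).foldl (fun g _ => pvApp g (d + ii) " ") g
    let g2 := (List.range (br.getD (d+ii) []).length).foldl
        (fun g jj => pvApp (pvApp g (d+ii) " ") (d+ii) ((br.getD (d+ii) []).getD jj " ")) g1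
    (List.range (ii+1)).foldl (fun g _ => pvApp g (d+ii) " ") g2)
    (pvP3 br d)

def rotate_by_45 (b : List (List String)) (dim : Int) : List (List String) :=
  pvP4 (pvBr2 b dim.toNat) dim.toNat

-- ===== PORT B =====
-- (Source B validates dim ≥ 1 with a ValueError; those inputs are outside Pre_rotate_by_45,
-- where nothing is claimed — the port just computes the empty comprehension there)
def rotate_by_45_alt (b : List (List String)) (dim : Int) : List (List String) :=
  let n := 2 * dim - 1
  (PySem.List.pyRange 0 n 1).map (fun i =>
    (PySem.List.pyRange 0 n 1).map (fun k =>
      let t := i + k - (dim - 1)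
      let r := PySem.Int.floordiv t 2
      let c := k - r
      if PySem.Int.mod t 2 = 0 ∧ 0 ≤ r ∧ r < dim ∧ 0 ≤ c ∧ c < dim
      then pvGet2 b r.toNat c.toNat else " "))

-- ===== PRECONDITION & SPEC =====
-- Pre_ is exactly where the Python A returns: dim ≥ 1 and the first dim rows of b exist,
-- each with at least dim entries (A reads every cell (r,c) with 0 ≤ r,c < dim; on any
-- other input it raises IndexError).
def Pre_rotate_by_45 (b : List (List String)) (dim : Int) : Prop :=
  1 ≤ dim ∧ dim ≤ (b.length : Int) ∧ ∀ row ∈ b.take dim.toNat, dim ≤ (row.length : Int)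
instance (b : List (List String)) (dim : Int) : Decidable (Pre_rotate_by_45 b dim) := by
  unfold Pre_rotate_by_45; infer_instance
def pvWitness_rotate_by_45 : List (List String) × Int := ([["a", "b"], ["c", "d"]], 2)


def Spec_rotate_by_45 (b : List (List String)) (dim : Int) (out : List (List String)) : Prop := out = rotate_by_45_alt b dim
instance (b : List (List String)) (dim : Int) (out : List (List String)) : Decidable (Spec_rotate_by_45 b dim out) := by unfold Spec_rotate_by_45; infer_instance

-- ===== CLAIM (what is proved, stated in full; the proofs are below) =====
def Claim_equal_rotate_by_45 : Prop := ∀ (b : List (List String)) (dim : Int), Dom_rotate_by_45 b dim → Pre_rotate_by_45 b dim → Spec_rotate_by_45 b dim (rotate_by_45 b dim)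

-- ===== LEMMAS AND PROOFS =====

theorem pvWitness_ok :
    Dom_rotate_by_45 pvWitness_rotate_by_45.1 pvWitness_rotate_by_45.2 ∧
    Pre_rotate_by_45 pvWitness_rotate_by_45.1 pvWitness_rotate_by_45.2 := by
  constructor <;> decide

-- `row[i].append`-style update appending a whole chunk at once
def chApp (g : List (List String)) (i : Nat) (xs : List String) : List (List String) :=
  g.set i (g.getD i [] ++ xs)

theorem length_chApp (g : List (List String)) (i : Nat) (xs : List String) :
    (chApp g i xs).length = g.length := by simp [chApp]

theorem getD_set_self (g : List (List String)) (i : Nat) (v : List String) (h : i < g.length) :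
    (g.set i v).getD i [] = v := by
  simp [List.getD_eq_getElem?_getD, h]

theorem getD_set_ne (g : List (List String)) (i j : Nat) (v : List String) (h : j ≠ i) :
    (g.set i v).getD j [] = g.getD j [] := by
  simp [List.getD_eq_getElem?_getD, (Ne.symm h : i ≠ j)]

theorem getD_chApp_self (g : List (List String)) (i : Nat) (xs : List String) (h : i < g.length) :
    (chApp g i xs).getD i [] = g.getD i [] ++ xs := getD_set_self _ _ _ h

theorem getD_chApp_ne (g : List (List String)) (i j : Nat) (xs : List String) (h : j ≠ i) :
    (chApp g i xs).getD j [] = g.getD j [] := getD_set_ne _ _ _ _ h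

theorem chApp_of_length_le (g : List (List String)) (i : Nat) (xs : List String)
    (h : g.length ≤ i) : chApp g i xs = g := List.set_eq_of_length_le (by simpa using h)

theorem chApp_nil (g : List (List String)) (i : Nat) : chApp g i [] = g := by
  by_cases h : i < g.length
  · show g.set i (g.getD i [] ++ []) = g
    rw [List.append_nil, List.getD_eq_getElem _ _ h]
    exact List.set_getElem_self h
  · exact chApp_of_length_le _ _ _ (by omega)

theorem chApp_chApp (g : List (List String)) (i : Nat) (u v : List String) :
    chApp (chApp g i u) i v = chApp g i (u ++ v) := by
  by_cases h : i < g.length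
  · show (chApp g i u).set i ((chApp g i u).getD i [] ++ v) = _
    rw [getD_chApp_self _ _ _ h]
    simp [chApp, List.set_set, List.append_assoc]
  · have h1 : g.length ≤ i := by omega
    rw [chApp_of_length_le _ _ _ h1, chApp_of_length_le _ _ _ h1,
      chApp_of_length_le _ _ _ h1]

theorem pvApp_eq_chApp (g : List (List String)) (i : Nat) (x : String) :
    pvApp g i x = chApp g i [x] := rfl

theorem foldl_pvApp (i : Nat) (f : Nat → String) :
    ∀ (l : List Nat) (g : List (List String)),
      l.foldl (fun g jj => pvApp g i (f jj)) g = chApp g i (l.map f)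
  | [], g => by simp [chApp_nil]
  | x :: l, g => by
    rw [List.foldl_cons, foldl_pvApp i f l, pvApp_eq_chApp, chApp_chApp]
    simp

theorem foldl_pvApp2 (i : Nat) (f : Nat → String) :
    ∀ (l : List Nat) (g : List (List String)),
      l.foldl (fun g jj => pvApp (pvApp g i " ") i (f jj)) g
        = chApp g i (l.flatMap (fun jj => [" ", f jj]))
  | [], g => by simp [chApp_nil]
  | x :: l, g => by
    rw [List.foldl_cons, foldl_pvApp2 i f l]
    show chApp (chApp (chApp g i [" "]) i [f x]) i _ = _
    rw [chApp_chApp, chApp_chApp]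
    simp

theorem length_foldl_chApp (idx : Nat → Nat) (F : Nat → List String) :
    ∀ (l : List Nat) (g : List (List String)),
      (l.foldl (fun g ii => chApp g (idx ii) (F ii)) g).length = g.length
  | [], g => rfl
  | x :: l, g => by
    simp only [List.foldl_cons, length_foldl_chApp idx F l, length_chApp]

theorem getD_foldl_chApp (off : Nat) (F : Nat → List String) :
    ∀ (m : Nat) (g : List (List String)) (j : Nat), off + m ≤ g.length →
      ((List.range m).foldl (fun g ii => chApp g (off + ii) (F ii)) g).getD j []
        = if off ≤ j ∧ j < off + m then g.getD j [] ++ F (j - off) else g.getD j []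
  | 0, g, j, _ => by simp
  | m + 1, g, j, h => by
    rw [List.range_succ, List.foldl_append, List.foldl_cons, List.foldl_nil]
    have hlen : (((List.range m).foldl (fun g ii => chApp g (off + ii) (F ii)) g)).length
        = g.length := length_foldl_chApp _ _ _ _
    by_cases hj : j = off + m
    · rw [hj, getD_chApp_self _ _ _ (by omega)]
      rw [getD_foldl_chApp off F m g (off + m) (by omega)]
      simp
    · rw [getD_chApp_ne _ _ _ _ hj, getD_foldl_chApp off F m g j (by omega)]
      by_cases h1 : off ≤ j ∧ j < off + m
      · rw [if_pos h1, if_pos (by omega)]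
      · rw [if_neg h1, if_neg (by omega)]

-- anti-diagonal contents (top wedge incl. middle, bottom wedge)
def brTop (b : List (List String)) (d j : Nat) : List String :=
  (List.range (j+1)).map (fun jj => pvGet2 b jj (d - 1 - j + jj))
def brBot (b : List (List String)) (d ii : Nat) : List String :=
  (List.range (d - 1 - ii)).map (fun jj => pvGet2 b (ii + 1 + jj) jj)

theorem pvBr1_eq (b : List (List String)) (d : Nat) :
    pvBr1 b d = (List.range d).foldl (fun g ii => chApp g (0 + ii) (brTop b d ii))
      (List.replicate (2*d - 1) []) := by
  unfold pvBr1
  congr 1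
  funext g ii
  rw [foldl_pvApp ii (fun jj => pvGet2 b jj (d - 1 - ii + jj))]
  simp [brTop]

theorem length_pvBr1 (b : List (List String)) (d : Nat) :
    (pvBr1 b d).length = 2*d - 1 := by
  rw [pvBr1_eq]
  rw [length_foldl_chApp]
  simp

theorem getD_pvBr1 (b : List (List String)) (d : Nat) (hd : 1 ≤ d) (j : Nat) :
    (pvBr1 b d).getD j [] = if j < d then brTop b d j else [] := by
  rw [pvBr1_eq, getD_foldl_chApp 0 (brTop b d) d _ j (by simp; omega)]
  simp

theorem pvBr2_eq (b : List (List String)) (d : Nat) :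
    pvBr2 b d = (List.range (d-1)).foldl (fun g ii => chApp g (d + ii) (brBot b d ii))
      (pvBr1 b d) := by
  unfold pvBr2
  congr 1
  funext g ii
  rw [foldl_pvApp (d + ii) (fun jj => pvGet2 b (ii + 1 + jj) jj)]
  simp [brBot]

theorem getD_pvBr2 (b : List (List String)) (d : Nat) (hd : 1 ≤ d) (j : Nat) :
    (pvBr2 b d).getD j []
      = if j < d then brTop b d j else if j < 2*d - 1 then brBot b d (j - d) else [] := by
  rw [pvBr2_eq, getD_foldl_chApp d (brBot b d) (d-1) _ j (by rw [length_pvBr1]; omega)]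
  by_cases h1 : d ≤ j ∧ j < d + (d-1)
  · rw [if_pos h1, getD_pvBr1 b d hd, if_neg (by omega), if_neg (by omega), if_pos (by omega)]
    simp
  · rw [if_neg h1, getD_pvBr1 b d hd]
    by_cases h2 : j < d
    · rw [if_pos h2, if_pos h2]
    · rw [if_neg h2, if_neg h2, if_neg (by omega)]

-- the three print-row shapes, as A builds them
def topRow (br : List (List String)) (d ii : Nat) : List String :=
  (List.range (d - 2 - ii)).map (fun _ => " ")
    ++ ((List.range (br.getD ii []).length).flatMap
          (fun jj => [" ", (br.getD ii []).getD jj " "])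
        ++ (List.range (d - 1 - ii)).map (fun _ => " "))
def midRow (br : List (List String)) (d : Nat) : List String :=
  (br.getD (d-1) []).getD 0 " "
    :: (List.range' 1 ((br.getD (d-1) []).length - 1)).flatMap
         (fun jj => [" ", (br.getD (d-1) []).getD jj " "])
def botRow (br : List (List String)) (d ii : Nat) : List String :=
  (List.range ii).map (fun _ => " ")
    ++ ((List.range (br.getD (d+ii) []).length).flatMap
          (fun jj => [" ", (br.getD (d+ii) []).getD jj " "])
        ++ (List.range (ii+1)).map (fun _ => " "))

theorem pvP1_eq (br : List (List String)) (d : Nat) :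
    pvP1 br d = (List.range (d-1)).foldl (fun g ii => chApp g (0 + ii) (topRow br d ii))
      (List.replicate (2*d - 1) []) := by
  unfold pvP1
  congr 1
  funext g ii
  rw [foldl_pvApp ii (fun _ => " "), foldl_pvApp2 ii (fun jj => (br.getD ii []).getD jj " "),
    foldl_pvApp ii (fun _ => " "), chApp_chApp, chApp_chApp]
  simp [topRow]

theorem length_pvP1 (br : List (List String)) (d : Nat) :
    (pvP1 br d).length = 2*d - 1 := by
  rw [pvP1_eq, length_foldl_chApp]
  simp

theorem getD_pvP1 (br : List (List String)) (d : Nat) (hd : 1 ≤ d) (j : Nat) :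
    (pvP1 br d).getD j [] = if j < d - 1 then topRow br d j else [] := by
  rw [pvP1_eq, getD_foldl_chApp 0 (topRow br d) (d-1) _ j (by simp; omega)]
  simp

theorem pvP3_eq (br : List (List String)) (d : Nat) :
    pvP3 br d = chApp (pvP1 br d) (d-1) (midRow br d) := by
  unfold pvP3
  rw [foldl_pvApp2 (d-1) (fun jj => (br.getD (d-1) []).getD jj " "), pvApp_eq_chApp,
    chApp_chApp]
  rfl

theorem length_pvP3 (br : List (List String)) (d : Nat) :
    (pvP3 br d).length = 2*d - 1 := by
  rw [pvP3_eq, length_chApp, length_pvP1]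

theorem getD_pvP3 (br : List (List String)) (d : Nat) (hd : 1 ≤ d) (j : Nat) :
    (pvP3 br d).getD j []
      = if j < d - 1 then topRow br d j else if j = d - 1 then midRow br d else [] := by
  rw [pvP3_eq]
  by_cases h : j = d - 1
  · subst h
    rw [getD_chApp_self _ _ _ (by rw [length_pvP1]; omega), getD_pvP1 br d hd,
      if_neg (by omega), if_neg (by omega), if_pos rfl]
    simp
  · rw [getD_chApp_ne _ _ _ _ h, getD_pvP1 br d hd, if_neg h]

theorem pvP4_eq (br : List (List String)) (d : Nat) :
    pvP4 br d = (List.range (d-1)).foldl (fun g ii => chApp g (d + ii) (botRow br d ii))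
      (pvP3 br d) := by
  unfold pvP4
  congr 1
  funext g ii
  rw [foldl_pvApp (d+ii) (fun _ => " "),
    foldl_pvApp2 (d+ii) (fun jj => (br.getD (d+ii) []).getD jj " "),
    foldl_pvApp (d+ii) (fun _ => " "), chApp_chApp, chApp_chApp]
  simp [botRow]

theorem length_pvP4 (br : List (List String)) (d : Nat) :
    (pvP4 br d).length = 2*d - 1 := by
  rw [pvP4_eq, length_foldl_chApp, length_pvP3]

theorem getD_pvP4 (br : List (List String)) (d : Nat) (hd : 1 ≤ d) (j : Nat) :
    (pvP4 br d).getD j []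
      = if j < d - 1 then topRow br d j
        else if j = d - 1 then midRow br d
        else if j < 2*d - 1 then botRow br d (j - d) else [] := by
  rw [pvP4_eq, getD_foldl_chApp d (botRow br d) (d-1) _ j (by rw [length_pvP3]; omega)]
  by_cases h1 : d ≤ j ∧ j < d + (d-1)
  · rw [if_pos h1, getD_pvP3 br d hd, if_neg (by omega), if_neg (by omega), if_neg (by omega),
      if_neg (by omega), if_pos (by omega)]
    simp
  · rw [if_neg h1, getD_pvP3 br d hd]
    by_cases h2 : j < d - 1
    · rw [if_pos h2, if_pos h2]
    · rw [if_neg h2, if_neg h2]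
      by_cases h3 : j = d - 1
      · rw [if_pos h3, if_pos h3]
      · rw [if_neg h3, if_neg h3, if_neg (by omega)]

-- B's per-cell function (the body of the inner comprehension of the port of B)
def cellB (b : List (List String)) (dim i k : Int) : String :=
  let t := i + k - (dim - 1)
  let r := PySem.Int.floordiv t 2
  let c := k - r
  if PySem.Int.mod t 2 = 0 ∧ 0 ≤ r ∧ r < dim ∧ 0 ≤ c ∧ c < dim
  then pvGet2 b r.toNat c.toNat else " "

theorem cellB_eval (b : List (List String)) (dim i k : Int) :
    cellB b dim i k
      = (if (i + k - (dim-1)) % 2 = 0 ∧ 0 ≤ (i + k - (dim-1))/2 ∧ (i + k - (dim-1))/2 < dim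
            ∧ 0 ≤ k - (i + k - (dim-1))/2 ∧ k - (i + k - (dim-1))/2 < dim
         then pvGet2 b ((i + k - (dim-1))/2).toNat (k - (i + k - (dim-1))/2).toNat
         else " ") := by
  simp only [cellB, PySem.Int.floordiv_eq_ediv_of_pos (by norm_num : (0:Int) < 2),
    PySem.Int.mod_eq_emod_of_pos (by norm_num : (0:Int) < 2)]

theorem alt_characterize (b : List (List String)) (d : Nat) :
    rotate_by_45_alt b (d:Int)
      = (List.range (2*d-1)).map (fun (i : Nat) =>
          (List.range (2*d-1)).map (fun (k : Nat) => cellB b (d:Int) (i:Int) (k:Int))) := by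
  show (PySem.List.pyRange 0 (2*(d:Int)-1) 1).map
      (fun i => (PySem.List.pyRange 0 (2*(d:Int)-1) 1).map (fun k => cellB b (d:Int) i k)) = _
  rw [PySem.List.pyRange_one]
  have h : ((2*(d:Int)-1) - 0).toNat = 2*d-1 := by omega
  rw [h, List.map_map]
  refine List.map_congr_left ?_
  intro i _
  simp only [Function.comp_apply]
  rw [List.map_map]
  refine List.map_congr_left ?_
  intro k _
  simp [Function.comp_apply]

theorem interleave_eq (f : Nat → String) :
    ∀ (n : Nat), (List.range n).flatMap (fun jj => [" ", f jj])
      = (List.range (2*n)).map (fun t => if t % 2 = 0 then " " else f (t/2))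
  | 0 => by simp
  | n + 1 => by
    rw [List.range_succ, List.flatMap_append, interleave_eq f n]
    have h1 : 2*(n+1) = (2*n + 1) + 1 := by omega
    rw [h1, List.range_succ, List.range_succ, List.map_append, List.map_append]
    have h2 : (2*n) % 2 = 0 := by omega
    have h3 : ¬ (2*n+1) % 2 = 0 := by omega
    have h4 : (2*n+1)/2 = n := by omega
    simp [h2, h4]

theorem interleave_mid (f : Nat → String) :
    ∀ (m : Nat), f 0 :: (List.range' 1 m).flatMap (fun jj => [" ", f jj])
      = (List.range (2*m+1)).map (fun t => if t % 2 = 0 then f (t/2) else " ")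
  | 0 => by simp
  | m + 1 => by
    rw [List.range'_1_concat, List.flatMap_append]
    have h1 : 2*(m+1)+1 = ((2*m+1) + 1) + 1 := by omega
    rw [h1, List.range_succ, List.range_succ, List.map_append, List.map_append]
    rw [← List.cons_append, interleave_mid f m]
    simp [Nat.add_comm]

theorem map_range_split3 {α : Type} (a m c : Nat) (f : Nat → α) :
    (List.range (a + (m + c))).map f
      = (List.range a).map f
        ++ ((List.range m).map (fun t => f (a + t))
            ++ (List.range c).map (fun t => f (a + m + t))) := by
  rw [List.range_eq_range', ← List.range'_append (s:=0) (m:=a) (n:=m+c) (step:=1),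
    ← List.range'_append (s:=0+1*a) (m:=m) (n:=c) (step:=1)]
  simp only [List.map_append]
  rw [List.range'_eq_map_range, List.range'_eq_map_range, List.range'_eq_map_range,
    List.map_map, List.map_map, List.map_map]
  refine congrArg₂ _ ?_ (congrArg₂ _ ?_ ?_) <;>
    exact List.map_congr_left (fun x _ => by
      simp only [Function.comp_apply]; congr 1; omega)

theorem row_top (b : List (List String)) (d j : Nat) (hd : 1 ≤ d) (hj : j < d - 1) :
    topRow (pvBr2 b d) d j
      = (List.range (2*d-1)).map (fun (k : Nat) => cellB b (d:Int) (j:Int) (k:Int)) := by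
  have hbr : (pvBr2 b d).getD j [] = brTop b d j := by
    rw [getD_pvBr2 b d hd, if_pos (by omega)]
  have hlen : (brTop b d j).length = j + 1 := by simp [brTop]
  unfold topRow
  rw [hbr, hlen, interleave_eq]
  rw [show 2*d-1 = (d-2-j) + (2*(j+1) + (d-1-j)) by omega, map_range_split3]
  refine congrArg₂ _ ?_ (congrArg₂ _ ?_ ?_)
  · -- left padding: k = t < d-2-j, the diagonal index would be negative
    refine List.map_congr_left ?_
    intro t ht
    rw [List.mem_range] at ht
    rw [cellB_eval, if_neg (by omega)]
  · -- interleaved middle: k = (d-2-j) + t, t < 2*(j+1)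
    refine List.map_congr_left ?_
    intro t ht
    rw [List.mem_range] at ht
    rw [cellB_eval]
    by_cases hpar : t % 2 = 0
    · rw [if_pos hpar, if_neg (by omega)]
    · rw [if_neg hpar, if_pos (by omega)]
      rw [brTop, PySem.List.getD_map_range _ _ _ _ (by omega)]
      unfold pvGet2
      congr 2 <;> omega
  · -- right padding: k = (d-2-j) + 2*(j+1) + t
    refine List.map_congr_left ?_
    intro t ht
    rw [List.mem_range] at ht
    rw [cellB_eval, if_neg (by omega)]

theorem row_mid (b : List (List String)) (d : Nat) (hd : 1 ≤ d) :
    midRow (pvBr2 b d) d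
      = (List.range (2*d-1)).map (fun (k : Nat) => cellB b (d:Int) ((d-1 : Nat):Int) (k:Int)) := by
  have hbr : (pvBr2 b d).getD (d-1) [] = brTop b d (d-1) := by
    rw [getD_pvBr2 b d hd, if_pos (by omega)]
  have hlen : (brTop b d (d-1)).length = d := by simp [brTop]; omega
  unfold midRow
  rw [hbr, hlen]
  have h0 : (brTop b d (d-1)).getD 0 " " = (fun jj => (brTop b d (d-1)).getD jj " ") 0 := rfl
  rw [h0, interleave_mid (fun jj => (brTop b d (d-1)).getD jj " ") (d-1),
    show 2*(d-1)+1 = 2*d-1 by omega]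
  refine List.map_congr_left ?_
  intro t ht
  rw [List.mem_range] at ht
  rw [cellB_eval]
  by_cases hpar : t % 2 = 0
  · rw [if_pos hpar, if_pos (by omega)]
    rw [brTop, PySem.List.getD_map_range _ _ _ _ (by omega)]
    unfold pvGet2
    congr 2 <;> omega
  · rw [if_neg hpar, if_neg (by omega)]

theorem row_bot (b : List (List String)) (d j : Nat) (hd : 1 ≤ d) (hj1 : d ≤ j)
    (hj2 : j < 2*d-1) :
    botRow (pvBr2 b d) d (j - d)
      = (List.range (2*d-1)).map (fun (k : Nat) => cellB b (d:Int) (j:Int) (k:Int)) := by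
  have hbr : (pvBr2 b d).getD (d + (j - d)) [] = brBot b d (j - d) := by
    rw [show d + (j - d) = j by omega, getD_pvBr2 b d hd, if_neg (by omega), if_pos (by omega)]
  have hlen : (brBot b d (j - d)).length = d - 1 - (j - d) := by simp [brBot]
  unfold botRow
  rw [hbr, hlen, interleave_eq]
  rw [show 2*d-1 = (j-d) + (2*(d-1-(j-d)) + ((j-d)+1)) by omega, map_range_split3]
  refine congrArg₂ _ ?_ (congrArg₂ _ ?_ ?_)
  · refine List.map_congr_left ?_
    intro t ht
    rw [List.mem_range] at ht
    rw [cellB_eval, if_neg (by omega)]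
  · refine List.map_congr_left ?_
    intro t ht
    rw [List.mem_range] at ht
    rw [cellB_eval]
    by_cases hpar : t % 2 = 0
    · rw [if_pos hpar, if_neg (by omega)]
    · rw [if_neg hpar, if_pos (by omega)]
      rw [brBot, PySem.List.getD_map_range _ _ _ _ (by omega)]
      unfold pvGet2
      congr 2 <;> omega
  · refine List.map_congr_left ?_
    intro t ht
    rw [List.mem_range] at ht
    rw [cellB_eval, if_neg (by omega)]

-- ===== VERDICT (by name: the statement is the Claim_ definition above) =====
theorem rotate_by_45_spec : Claim_equal_rotate_by_45 := by
  intro b dim _ hpre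
  obtain ⟨hd1, -, -⟩ := hpre
  have hdim : dim = ((dim.toNat : Nat) : Int) := by omega
  set d := dim.toNat with hdd
  have hd : 1 ≤ d := by omega
  show rotate_by_45 b dim = rotate_by_45_alt b dim
  rw [hdim]
  show pvP4 (pvBr2 b (((d:Nat):Int)).toNat) (((d:Nat):Int)).toNat = _
  rw [Int.toNat_natCast, alt_characterize b d]
  apply List.ext_getElem
  · rw [length_pvP4]; simp
  · intro j h1 h2
    rw [List.getElem_map, List.getElem_range]
    rw [length_pvP4] at h1
    rw [← List.getD_eq_getElem (pvP4 (pvBr2 b d) d) [] (by rw [length_pvP4]; omega)]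
    rw [getD_pvP4 _ _ hd j]
    by_cases hc1 : j < d - 1
    · rw [if_pos hc1, row_top b d j hd hc1]
    · rw [if_neg hc1]
      by_cases hc2 : j = d - 1
      · rw [if_pos hc2, row_mid b d hd, hc2]
      · rw [if_neg hc2, if_pos (by omega), row_bot b d j hd (by omega) (by omega)]
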